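-- pv_equiv track=rewrite | github.com/Crloshernndez/coderbyte_exercises | Algorithms/medium/string_scramble.py | StringScramble
-- ===== SOURCE A (Python) =====
-- def StringScramble(str1, str2):
--
--     char_count_str1 = {}
--     char_count_str2 = {}
--
--     for char in str1:
--         char_count_str1[char] = char_count_str1.get(char, 0) + 1
--
--     for char in str2:
--         char_count_str2[char] = char_count_str2.get(char, 0) + 1
--
--     for char, count in char_count_str2.items():
--         if char not in char_count_str1 or char_count_str1[char] < count:
--             return False
--
--     return True
-- ===== SOURCE B (Python) =====
-- def StringScramble(str1, str2):
--     s1 = sorted(str1)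
--     s2 = sorted(str2)
--     i = 0
--     for ch in s2:
--         while i < len(s1) and s1[i] != ch:
--             i += 1
--         if i == len(s1):
--             return False
--         i += 1
--     return True
-- ===== Notes on version B (the rewrite author's own statement) =====
-- stated objective: alternative
-- what changed: B abandons hash counting entirely: it sorts both strings and runs a greedy two-pointer scan checking that sorted str2 is a subsequence of sorted str1 (subsequence of sorted lists = sub-multiset), instead of A's two hash counters compared afterwards.
import Mathlib
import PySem

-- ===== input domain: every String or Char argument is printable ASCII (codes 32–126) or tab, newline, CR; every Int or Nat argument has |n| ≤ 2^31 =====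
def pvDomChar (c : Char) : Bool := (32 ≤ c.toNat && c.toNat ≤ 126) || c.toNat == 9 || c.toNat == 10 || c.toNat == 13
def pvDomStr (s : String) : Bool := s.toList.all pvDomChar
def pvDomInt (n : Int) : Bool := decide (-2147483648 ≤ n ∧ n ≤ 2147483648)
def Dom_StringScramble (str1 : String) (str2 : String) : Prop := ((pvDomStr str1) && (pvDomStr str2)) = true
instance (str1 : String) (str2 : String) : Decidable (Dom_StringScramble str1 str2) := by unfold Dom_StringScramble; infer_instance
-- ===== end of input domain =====

-- B replaces A's hash-counting entirely: it sorts both strings and does a greedy two-pointer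
-- subsequence scan of sorted str2 through sorted str1; objective: alternative algorithm.

-- ===== PORT A =====
-- the final 'for char, count in char_count_str2.items(): …' loop with early return
def pvCheckItems (d1 : PySem.Dict Char Int) : List (Char × Int) → Bool
  | [] => true
  | (c, cnt) :: rest =>
    match d1.get? c with
    | none => false                                  -- char not in char_count_str1
    | some v => if v < cnt then false else pvCheckItems d1 rest

def StringScramble (str1 : String) (str2 : String) : Bool :=
  let d1 := str1.toList.foldl (fun d c => d.insert c (d.getD c 0 + 1)) PySem.Dict.empty
  let d2 := str2.toList.foldl (fun d c => d.insert c (d.getD c 0 + 1)) PySem.Dict.empty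
  pvCheckItems d1 d2.items

-- ===== PORT B =====
-- the two-pointer scan: for each ch of sorted str2, advance in sorted str1 past non-matching
-- chars (the 'while s1[i] != ch: i += 1' loop = dropping the head), fail if str1 is exhausted,
-- else consume the matched char and continue
def pvGreedy : List Char → List Char → Bool
  | _, [] => true
  | [], _ :: _ => false
  | a :: t1, b :: t2 => if a = b then pvGreedy t1 t2 else pvGreedy t1 (b :: t2)

def StringScramble_alt (str1 : String) (str2 : String) : Bool :=
  let s1 := PySem.List.sorted str1.toList (fun c => c) false
  let s2 := PySem.List.sorted str2.toList (fun c => c) false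
  pvGreedy s1 s2

-- ===== PRECONDITION & SPEC =====
def Spec_StringScramble (str1 : String) (str2 : String) (out : Bool) : Prop := out = StringScramble_alt str1 str2
instance (str1 : String) (str2 : String) (out : Bool) : Decidable (Spec_StringScramble str1 str2 out) := by unfold Spec_StringScramble; infer_instance

-- ===== CLAIM (what is proved, stated in full; the proofs are below) =====
def Claim_equal_StringScramble : Prop := ∀ (str1 : String) (str2 : String), Dom_StringScramble str1 str2 → Spec_StringScramble str1 str2 (StringScramble str1 str2)

-- ===== LEMMAS AND PROOFS =====

-- greedy matching decides the subsequence relation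
lemma pvGreedy_iff (l1 : List Char) : ∀ l2 : List Char, pvGreedy l1 l2 = true ↔ l2.Sublist l1 := by
  induction l1 with
  | nil =>
    intro l2
    cases l2 with
    | nil => simp [pvGreedy]
    | cons b t2 => simp [pvGreedy]
  | cons a t1 ih =>
    intro l2
    cases l2 with
    | nil => simp [pvGreedy]
    | cons b t2 =>
      simp only [pvGreedy]
      by_cases hab : a = b
      · subst hab
        rw [if_pos rfl, ih]
        exact ⟨fun h => h.cons₂ a, fun h => List.cons_sublist_cons.mp h⟩
      · rw [if_neg hab, ih]
        constructor
        · intro h; exact h.cons a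
        · intro h
          cases h with
          | cons _ h' => exact h'
          | cons₂ => exact absurd rfl hab

-- A's item-checking loop is an 'all' statement over the items list
lemma pvCheckItems_eq (d : PySem.Dict Char Int) (l : List (Char × Int)) :
    pvCheckItems d l = decide (∀ p ∈ l, ∃ v, d.get? p.1 = some v ∧ ¬ v < p.2) := by
  induction l with
  | nil => simp [pvCheckItems]
  | cons p t ih =>
    obtain ⟨c, cnt⟩ := p
    simp only [pvCheckItems]
    cases hg : d.get? c with
    | none =>
      show false = _
      have hno : ¬ (∀ p ∈ (c, cnt) :: t, ∃ v, d.get? p.1 = some v ∧ ¬ v < p.2) := by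
        intro h
        obtain ⟨v, hv, _⟩ := h (c, cnt) (by simp)
        simp only at hv
        rw [hg] at hv
        simp at hv
      rw [decide_eq_false hno]
    | some v =>
      show (if v < cnt then false else pvCheckItems d t) = _
      by_cases hlt : v < cnt
      · have hno : ¬ (∀ p ∈ (c, cnt) :: t, ∃ w, d.get? p.1 = some w ∧ ¬ w < p.2) := by
          intro h
          obtain ⟨w, hw, hw2⟩ := h (c, cnt) (by simp)
          simp only at hw hw2
          rw [hg] at hw
          cases hw
          exact hw2 hlt
        rw [if_pos hlt, decide_eq_false hno]
      · rw [if_neg hlt, ih]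
        refine (decide_eq_decide).mpr ?_
        constructor
        · intro h p hp
          rcases List.mem_cons.mp hp with hpc | hpt
          · subst hpc; exact ⟨v, hg, hlt⟩
          · exact h p hpt
        · intro h p hp; exact h p (List.mem_cons_of_mem _ hp)

-- lookup in the counter of l1
lemma counter_get? (l1 : List Char) (c : Char) :
    (PySem.Dict.counter l1).get? c = if c ∈ l1 then some ((l1.count c : Int)) else none := by
  by_cases h : c ∈ l1
  · rw [if_pos h]
    cases hg : (PySem.Dict.counter l1).get? c with
    | none =>
      have hc : (PySem.Dict.counter l1).contains c = false :=
        (PySem.Dict.get?_eq_none_iff_contains _ _).mp hg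
      rw [PySem.Dict.contains_counter] at hc
      simp [h] at hc
    | some v =>
      have hv : (PySem.Dict.counter l1).getD c 0 = v := by
        rw [PySem.Dict.getD_eq_get?_getD, hg]; rfl
      rw [PySem.Dict.getD_counter] at hv
      rw [hv]
  · rw [if_neg h]
    cases hg : (PySem.Dict.counter l1).get? c with
    | none => rfl
    | some v =>
      exfalso
      have hc : (PySem.Dict.counter l1).contains c = true := by
        rw [PySem.Dict.contains_eq_isSome_get?, hg]; rfl
      rw [PySem.Dict.contains_counter] at hc
      simp at hc
      exact h hc

-- A's items condition is exactly count-wise inclusion of l2's multiset in l1's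
lemma itemsCond_iff_counts (l1 l2 : List Char) :
    (∀ p ∈ (PySem.Dict.counter l2).items, ∃ v, (PySem.Dict.counter l1).get? p.1 = some v ∧ ¬ v < p.2)
  ↔ (∀ c, l2.count c ≤ l1.count c) := by
  rw [PySem.Dict.items_counter]
  constructor
  · intro h c
    by_cases hc : c ∈ l2
    · have hmem : c ∈ PySem.Set.ofList l2 := (PySem.Set.mem_ofList _ _).mpr hc
      obtain ⟨v, hv, hlt⟩ := h (c, (l2.count c : Int)) (List.mem_map_of_mem hmem)
      simp only at hv hlt
      rw [counter_get?] at hv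
      by_cases h1 : c ∈ l1
      · rw [if_pos h1] at hv
        cases hv
        exact_mod_cast not_lt.mp hlt
      · rw [if_neg h1] at hv
        simp at hv
    · rw [List.count_eq_zero_of_not_mem hc]
      exact Nat.zero_le _
  · intro h p hp
    obtain ⟨c, hcmem, rfl⟩ := List.mem_map.mp hp
    have hc : c ∈ l2 := (PySem.Set.mem_ofList _ _).mp hcmem
    have hle := h c
    have hc1 : c ∈ l1 := by
      by_contra h1
      have h2 : 0 < l2.count c := List.count_pos_iff.mpr hc
      rw [List.count_eq_zero_of_not_mem h1] at hle
      omega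
    refine ⟨(l1.count c : Int), ?_, ?_⟩
    · simp only
      rw [counter_get?, if_pos hc1]
    · simp only [not_lt]
      exact_mod_cast hle

-- B succeeds exactly on count-wise inclusion (sorting makes subsequence = sub-multiset)
lemma alt_iff_counts (l1 l2 : List Char) :
    pvGreedy (PySem.List.sorted l1 (fun c => c) false) (PySem.List.sorted l2 (fun c => c) false) = true
  ↔ (∀ c, l2.count c ≤ l1.count c) := by
  set s1 := PySem.List.sorted l1 (fun c => c) false with hs1
  set s2 := PySem.List.sorted l2 (fun c => c) false with hs2
  have hp1 : s1.Perm l1 := PySem.List.sorted_perm l1 (fun c => c) false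
  have hp2 : s2.Perm l2 := PySem.List.sorted_perm l2 (fun c => c) false
  rw [pvGreedy_iff]
  constructor
  · intro h c
    have := (h.subperm).count_le c
    rwa [hp1.count_eq, hp2.count_eq] at this
  · intro h
    have hsp : List.Subperm s2 s1 := by
      refine hp2.subperm.trans (List.Subperm.trans ?_ hp1.symm.subperm)
      exact List.subperm_iff_count.mpr h
    haveI : Std.Antisymm ((· ≤ ·) : Char → Char → Prop) := ⟨fun _ _ h h' => le_antisymm h h'⟩
    refine List.sublist_of_subperm_of_pairwise (r := (· ≤ ·)) hsp ?_ ?_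
    · simpa using PySem.List.sorted_pairwise l2 (fun c => c)
    · simpa using PySem.List.sorted_pairwise l1 (fun c => c)

-- ===== VERDICT (by name: the statement is the Claim_ definition above) =====
theorem StringScramble_spec : Claim_equal_StringScramble := by
  intro str1 str2 _
  unfold Spec_StringScramble StringScramble StringScramble_alt
  simp only [PySem.Dict.foldl_insert_getD_add_one_eq_counter]
  rw [pvCheckItems_eq]
  rw [Bool.eq_iff_iff, decide_eq_true_iff, itemsCond_iff_counts,
      ← alt_iff_counts str1.toList str2.toList]
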